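-- pv_equiv track=rewrite | github.com/TimurYandex/Advent_of_code2024 | 19.py | check_str_both
-- ===== SOURCE A (Python) =====
-- def check_str_both(s: str, parts: [str]) -> int:
--     dyn = [0] * (len(s) + 1)
--     dyn[0] = 1
--     dyn1 = [False] * (len(s) + 1)
--     dyn1[0] = True
--     for i in range(len(s) + 1):
--         dyn[i] += sum([dyn[i - len(part)] for part in parts if s[:i].endswith(part)])
--         dyn1[i] |= any([dyn[i - len(part)] for part in parts if s[:i].endswith(part)])
--
--     return dyn[len(s)], dyn1[len(s)]
-- ===== SOURCE B (Python) =====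
-- def check_str_both(s: str, parts: [str]) -> int:
--     # Forward-propagating (scatter) DP: each reachable prefix end i pushes its count to
--     # i + len(p) for every part matching at offset i (startswith at offset, no slicing);
--     # dead positions (count 0) are skipped; the existence flag is count > 0.
--     n = len(s)
--     c = [0] * (n + 1)
--     c[0] = 1
--     for i in range(n + 1):
--         ci = c[i]
--         if ci:
--             for p in parts:
--                 j = i + len(p)
--                 if j <= n and s.startswith(p, i):
--                     c[j] += ci
--     return c[n], c[n] > 0
-- ===== Notes on version B (the rewrite author's own statement) =====
-- stated objective: faster
-- what changed: Replaces A's backward gather DP (two parallel arrays, slicing the whole prefix s[:i] and scanning the parts twice per position) by a forward scatter DP over a single count array: each position with a nonzero count pushes it to i+len(p) for every part matching via startswith at an offset (no slicing), dead positions are skipped, and the existence flag is derived as count > 0.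
import Mathlib
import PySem

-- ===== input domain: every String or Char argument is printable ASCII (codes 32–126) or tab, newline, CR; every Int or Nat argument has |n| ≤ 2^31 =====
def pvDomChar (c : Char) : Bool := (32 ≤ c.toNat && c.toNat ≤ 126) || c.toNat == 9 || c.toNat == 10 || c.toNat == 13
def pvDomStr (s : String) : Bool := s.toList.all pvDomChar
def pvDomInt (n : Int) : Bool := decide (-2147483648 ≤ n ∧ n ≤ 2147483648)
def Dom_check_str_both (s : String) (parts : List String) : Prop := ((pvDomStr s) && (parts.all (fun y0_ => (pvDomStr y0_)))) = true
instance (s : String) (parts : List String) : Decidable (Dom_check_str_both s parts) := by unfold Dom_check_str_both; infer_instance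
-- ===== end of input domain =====

-- B replaces A's backward "gather" DP (which slices the whole prefix s[:i] and re-scans the
-- parts a second time for the existence flag) by a forward "scatter" DP: each reachable
-- prefix end pushes its count to the positions obtainable by appending one part, tested with
-- startswith at an offset (no slicing), skipping dead positions; the flag is count > 0.

-- ===== PORT A =====
-- loop body of A's 'for i in range(len(s) + 1)' (the dyn/dyn1 updates); the indices dyn[i]
-- and dyn[i - len(part)] are always in range (the endswith guard forces len(part) ≤ i), so
-- the total forms pyGetD/pySetD are exact here
def stepA (cs : List Char) (parts : List String) (st : List Int × List Bool) (i : Int) :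
    List Int × List Bool :=
  let pref := PySem.List.slice cs none (some i)      -- s[:i]
  let vals := (parts.filter (fun p => PySem.Chars.endswith pref p.toList)).map
    (fun p => PySem.List.pyGetD st.1 (i - (p.toList.length : Int)) 0)
  let dyn := PySem.List.pySetD st.1 i (PySem.List.pyGetD st.1 i 0 + vals.sum)
  let vals1 := (parts.filter (fun p => PySem.Chars.endswith pref p.toList)).map
    (fun p => PySem.List.pyGetD dyn (i - (p.toList.length : Int)) 0)
  let dyn1 := PySem.List.pySetD st.2 i
    (PySem.List.pyGetD st.2 i false || vals1.any (fun x => decide (x ≠ 0)))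
  (dyn, dyn1)

def check_str_both (s : String) (parts : List String) : Int × Bool :=
  let cs := s.toList
  let dyn0 : List Int := (List.replicate (cs.length + 1) 0).set 0 1
  let dyn10 : List Bool := (List.replicate (cs.length + 1) false).set 0 true
  let st := (PySem.List.pyRange 0 ((cs.length : Int) + 1) 1).foldl (stepA cs parts) (dyn0, dyn10)
  (PySem.List.pyGetD st.1 (cs.length : Int) 0, PySem.List.pyGetD st.2 (cs.length : Int) false)

-- ===== PORT B =====
-- exact port of Python's s.startswith(p, i) (startswith with a start offset follows slice
-- semantics): a prefix test against the slice s[i:]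
def startsAt (cs p : List Char) (i : Int) : Bool :=
  PySem.Chars.startswith (PySem.List.slice cs (some i) none) p

-- one push of B's inner loop: 'j = i + len(p); if j <= n and s.startswith(p, i): c[j] += ci';
-- the guard j ≤ n keeps the index in range, so the total forms pyGetD/pySetD are exact
def pushB (cs : List Char) (i ci : Int) (c : List Int) (p : String) : List Int :=
  let j := i + (p.toList.length : Int)
  if j ≤ (cs.length : Int) && startsAt cs p.toList i then
    PySem.List.pySetD c j (PySem.List.pyGetD c j 0 + ci)
  else c

-- body of B's 'for i in range(n + 1)': snapshot ci, skip dead positions, scatter forward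
def stepB (cs : List Char) (parts : List String) (c : List Int) (i : Int) : List Int :=
  let ci := PySem.List.pyGetD c i 0
  if ci ≠ 0 then parts.foldl (pushB cs i ci) c else c

def check_str_both_alt (s : String) (parts : List String) : Int × Bool :=
  let cs := s.toList
  let n := cs.length
  let c0 : List Int := (List.replicate (n + 1) 0).set 0 1
  let c := (PySem.List.pyRange 0 ((n : Int) + 1) 1).foldl (stepB cs parts) c0
  (PySem.List.pyGetD c (n : Int) 0, decide (0 < PySem.List.pyGetD c (n : Int) 0))

-- ===== PRECONDITION & SPEC =====
def Spec_check_str_both (s : String) (parts : List String) (out : Int × Bool) : Prop :=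
  out = check_str_both_alt s parts
instance (s : String) (parts : List String) (out : Int × Bool) :
    Decidable (Spec_check_str_both s parts out) := by unfold Spec_check_str_both; infer_instance

-- ===== CLAIM (what is proved, stated in full; the proofs are below) =====
def Claim_equal_check_str_both : Prop := ∀ (s : String) (parts : List String),
  Dom_check_str_both s parts → Spec_check_str_both s parts (check_str_both s parts)

-- ===== LEMMAS AND PROOFS =====

-- generic list helpers
theorem pv_getD_concat {l : List Int} {a : Int} : (l ++ [a]).getD l.length 0 = a := by
  simp [List.getD_eq_getElem?_getD]

theorem pv_getD_concat' {l : List Int} {a : Int} {k : Nat} (h : l.length = k) :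
    (l ++ [a]).getD k 0 = a := by
  subst h; exact pv_getD_concat

theorem pv_getD_append_left {α : Type} [Inhabited α] {l r : List α} {j : Nat} (d : α)
    (h : j < l.length) : (l ++ r).getD j d = l.getD j d := by
  simp [List.getD_eq_getElem?_getD, List.getElem?_append_left h]

theorem pv_getD_nonneg {l : List Int} (h : ∀ x ∈ l, 0 ≤ x) (j : Nat) : 0 ≤ l.getD j 0 := by
  rw [List.getD_eq_getElem?_getD]
  cases hj : l[j]? with
  | none => simp
  | some v => exact h v (List.mem_of_getElem? hj)

theorem pv_sum_ite_filter (l : List String) (q : String → Bool) (f : String → Int) :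
    ((l.filter q).map f).sum = (l.map (fun p => if q p = true then f p else 0)).sum := by
  induction l with
  | nil => rfl
  | cons a l ih =>
    by_cases h : q a = true
    · simp [h, ih]
    · simp [h, ih]

theorem pv_pySetD_natCast {α : Type} (xs : List α) (n : Nat) (v : α) (h : n < xs.length) :
    PySem.List.pySetD xs (n : Int) v = xs.set n v := by
  simp [PySem.List.pySetD, PySem.List.pySet?_natCast xs n v h]

theorem pv_pySetD_zero {α : Type} (xs : List α) (v : α) (h : 0 < xs.length) :
    PySem.List.pySetD xs 0 v = xs.set 0 v := by
  simpa using pv_pySetD_natCast xs 0 v h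

theorem pv_set_mid {α : Type} {l r : List α} {x v : α} :
    (l ++ x :: r).set l.length v = l ++ v :: r := by
  rw [List.set_append]
  simp

theorem pv_set_mid' {α : Type} {l r : List α} {x v : α} {k : Nat} (h : l.length = k) :
    (l ++ x :: r).set k v = l ++ v :: r := by
  subst h; exact pv_set_mid

-- the DP table A fills: pvTbl cs parts k = [final value at position j | j < k];
-- the appended pre-update cell (1 at position 0, else 0) is what an empty part reads
def pvTbl (cs : List Char) (parts : List String) : Nat → List Int
  | 0 => []
  | k+1 =>
    let t := pvTbl cs parts k
    t ++ [(if k = 0 then (1:Int) else 0) +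
      ((parts.filter (fun p => PySem.Chars.endswith (cs.take k) p.toList)).map
        (fun p => (t ++ [if k = 0 then (1:Int) else 0]).getD (k - p.toList.length) 0)).sum]

def pvF (cs : List Char) (parts : List String) (k : Nat) : Int :=
  (pvTbl cs parts (k+1)).getD k 0

-- the boolean A tracks at position k (reads the already-updated array)
def pvG (cs : List Char) (parts : List String) (k : Nat) : Bool :=
  decide (k = 0) ||
    (parts.filter (fun p => PySem.Chars.endswith (cs.take k) p.toList)).any
      (fun p => decide (pvF cs parts (k - p.toList.length) ≠ 0))

theorem pvTbl_length (cs : List Char) (parts : List String) (k : Nat) :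
    (pvTbl cs parts k).length = k := by
  induction k with
  | zero => rfl
  | succ k ih => simp [pvTbl, ih]

theorem pvF_eq (cs : List Char) (parts : List String) (k : Nat) :
    pvF cs parts k = (if k = 0 then (1:Int) else 0) +
      ((parts.filter (fun p => PySem.Chars.endswith (cs.take k) p.toList)).map
        (fun p => (pvTbl cs parts k ++ [if k = 0 then (1:Int) else 0]).getD
          (k - p.toList.length) 0)).sum := by
  unfold pvF
  conv_lhs => rw [pvTbl]
  exact pv_getD_concat' (pvTbl_length cs parts k)

theorem pvTbl_getD (cs : List Char) (parts : List String) {j k : Nat} (h : j < k) :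
    (pvTbl cs parts k).getD j 0 = pvF cs parts j := by
  induction k with
  | zero => omega
  | succ k ih =>
    rcases Nat.lt_or_ge j k with hj | hj
    · conv_lhs => rw [pvTbl]
      rw [pv_getD_append_left 0 (by rw [pvTbl_length]; exact hj)]
      exact ih hj
    · have hjk : j = k := by omega
      subst hjk
      rfl

theorem pvTbl_nonneg (cs : List Char) (parts : List String) (k : Nat) :
    ∀ x ∈ pvTbl cs parts k, 0 ≤ x := by
  induction k with
  | zero => intro x hx; simp [pvTbl] at hx
  | succ k ih =>
    intro x hx
    rw [pvTbl] at hx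
    simp only [List.mem_append, List.mem_singleton] at hx
    rcases hx with hx | rfl
    · exact ih x hx
    · apply add_nonneg
      · split <;> norm_num
      · apply List.sum_nonneg
        intro y hy
        simp only [List.mem_map] at hy
        obtain ⟨p, _, rfl⟩ := hy
        refine pv_getD_nonneg ?_ _
        intro z hz
        rcases List.mem_append.mp hz with hz | hz
        · exact ih z hz
        · rw [List.mem_singleton] at hz
          subst hz
          split <;> norm_num

theorem pvF_nonneg (cs : List Char) (parts : List String) (k : Nat) : 0 ≤ pvF cs parts k :=
  pv_getD_nonneg (pvTbl_nonneg cs parts (k+1)) k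

-- endswith on a prefix ↔ prefix-match at the offset
theorem pv_endswith_iff (cs p : List Char) (k : Nat) (hk : k ≤ cs.length) :
    PySem.Chars.endswith (cs.take k) p = true ↔
      p.length ≤ k ∧ p.isPrefixOf (cs.drop (k - p.length)) = true := by
  rw [PySem.Chars.endswith_iff, List.isPrefixOf_iff_prefix]
  constructor
  · rintro ⟨t, ht⟩
    have hlen : t.length + p.length = k := by
      have hlt := congrArg List.length ht
      simp [List.length_take] at hlt
      omega
    refine ⟨by omega, ?_⟩
    have hcs : cs = t ++ (p ++ cs.drop k) := by
      conv_lhs => rw [← List.take_append_drop k cs]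
      rw [← ht, List.append_assoc]
    rw [show k - p.length = t.length by omega, hcs, List.drop_left]
    exact List.prefix_append _ _
  · rintro ⟨hle, hpre⟩
    obtain ⟨u, hu⟩ := hpre
    refine ⟨cs.take (k - p.length), ?_⟩
    conv_rhs => rw [show k = (k - p.length) + p.length by omega]
    rw [List.take_add, ← hu, List.take_left]

-- only empty parts match the empty prefix
theorem pv_filter_zero_mem {cs : List Char} {parts : List String} {p : String}
    (hp : p ∈ parts.filter (fun p => PySem.Chars.endswith (cs.take 0) p.toList)) :
    p.toList = [] := by
  rw [List.mem_filter] at hp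
  have h := hp.2
  rwa [List.take_zero, PySem.Chars.endswith_iff, List.suffix_nil] at h

theorem pvF_zero_pos (cs : List Char) (parts : List String) : 0 < pvF cs parts 0 := by
  rw [pvF_eq, if_pos rfl]
  have hs : 0 ≤ ((parts.filter (fun p => PySem.Chars.endswith (cs.take 0) p.toList)).map
      (fun p => (pvTbl cs parts 0 ++ [(1:Int)]).getD (0 - p.toList.length) 0)).sum := by
    apply List.sum_nonneg
    intro y hy
    simp only [List.mem_map] at hy
    obtain ⟨p, _, rfl⟩ := hy
    refine pv_getD_nonneg ?_ _
    intro z hz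
    rcases List.mem_append.mp hz with hz | hz
    · simp [pvTbl] at hz
    · rw [List.mem_singleton] at hz
      subst hz
      norm_num
  omega

-- the boolean at the end equals positivity of the count
theorem pvG_eq (cs : List Char) (parts : List String) {k : Nat} (hk : k ≤ cs.length) :
    pvG cs parts k = decide (0 < pvF cs parts k) := by
  rcases Nat.eq_zero_or_pos k with rfl | hkpos
  · rw [decide_eq_true (pvF_zero_pos cs parts)]
    simp [pvG]
  · have hk0 : ¬ (k = 0) := by omega
    have hFk : pvF cs parts k =
        ((parts.filter (fun p => PySem.Chars.endswith (cs.take k) p.toList)).map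
          (fun p => (pvTbl cs parts k ++ [(0:Int)]).getD (k - p.toList.length) 0)).sum := by
      rw [pvF_eq]
      simp [hk0]
    have hw_nonneg : ∀ (p : String),
        0 ≤ (pvTbl cs parts k ++ [(0:Int)]).getD (k - p.toList.length) 0 := by
      intro p
      refine pv_getD_nonneg ?_ _
      intro z hz
      rcases List.mem_append.mp hz with hz | hz
      · exact pvTbl_nonneg cs parts k z hz
      · rw [List.mem_singleton] at hz
        subst hz
        norm_num
    have hw_pos : ∀ p ∈ parts.filter (fun p => PySem.Chars.endswith (cs.take k) p.toList),
        0 < p.toList.length →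
        (pvTbl cs parts k ++ [(0:Int)]).getD (k - p.toList.length) 0 =
          pvF cs parts (k - p.toList.length) := by
      intro p hp hL
      rw [List.mem_filter] at hp
      have hple := ((pv_endswith_iff cs p.toList k hk).mp hp.2).1
      rw [pv_getD_append_left 0 (by rw [pvTbl_length]; omega), pvTbl_getD cs parts (by omega)]
    have hw_zero : ∀ (p : String), p.toList.length = 0 →
        (pvTbl cs parts k ++ [(0:Int)]).getD (k - p.toList.length) 0 = 0 := by
      intro p hL
      rw [hL, Nat.sub_zero, pv_getD_concat' (pvTbl_length cs parts k)]
    unfold pvG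
    simp only [hk0, decide_false, Bool.false_or]
    by_cases hpos : 0 < pvF cs parts k
    · rw [decide_eq_true hpos]
      have hsum : ((parts.filter (fun p => PySem.Chars.endswith (cs.take k) p.toList)).map
          (fun p => (pvTbl cs parts k ++ [(0:Int)]).getD (k - p.toList.length) 0)).sum ≠ 0 := by
        rw [← hFk]; omega
      have hex : ∃ p ∈ parts.filter (fun p => PySem.Chars.endswith (cs.take k) p.toList),
          (pvTbl cs parts k ++ [(0:Int)]).getD (k - p.toList.length) 0 ≠ 0 := by
        by_contra hall
        push Not at hall
        refine hsum (List.sum_eq_zero ?_)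
        intro x hx
        simp only [List.mem_map] at hx
        obtain ⟨p, hp, rfl⟩ := hx
        exact hall p hp
      obtain ⟨p, hp, hwp⟩ := hex
      have hL : 0 < p.toList.length := by
        by_contra h
        exact hwp (hw_zero p (by omega))
      rw [List.any_eq_true]
      exact ⟨p, hp, by rw [← hw_pos p hp hL] at *; simpa using hwp⟩
    · have hz : pvF cs parts k = 0 := le_antisymm (by omega) (pvF_nonneg cs parts k)
      rw [decide_eq_false hpos]
      rw [List.any_eq_false]
      intro p hp
      simp only [decide_eq_true_eq, not_not]
      by_cases hL : p.toList.length = 0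
      · rw [hL, Nat.sub_zero]
        exact hz
      · rw [← hw_pos p hp (by omega)]
        have hmem : (pvTbl cs parts k ++ [(0:Int)]).getD (k - p.toList.length) 0 ∈
            (parts.filter (fun p => PySem.Chars.endswith (cs.take k) p.toList)).map
              (fun p => (pvTbl cs parts k ++ [(0:Int)]).getD (k - p.toList.length) 0) :=
          List.mem_map_of_mem hp
        have hle := List.single_le_sum (l := (parts.filter
            (fun p => PySem.Chars.endswith (cs.take k) p.toList)).map
            (fun p => (pvTbl cs parts k ++ [(0:Int)]).getD (k - p.toList.length) 0))
          (by intro x hx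
              simp only [List.mem_map] at hx
              obtain ⟨q, _, rfl⟩ := hx
              exact hw_nonneg q) _ hmem
        rw [← hFk] at hle
        have := hw_nonneg p
        omega

-- ===== A-side loop invariant =====

def pvA (cs : List Char) (parts : List String) (m : Nat) : List Int × List Bool :=
  (pvTbl cs parts m ++ List.replicate (cs.length + 1 - m) 0,
   (List.range m).map (pvG cs parts) ++ List.replicate (cs.length + 1 - m) false)

theorem pv_stepA (cs : List Char) (parts : List String)
    {m : Nat} (h1 : 1 ≤ m) (hm : m ≤ cs.length) :
    stepA cs parts (pvA cs parts m) (m : Int) = pvA cs parts (m + 1) := by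
  have hm0 : ¬ (m = 0) := by omega
  have hT : (pvTbl cs parts m).length = m := pvTbl_length cs parts m
  have hrep : List.replicate (cs.length + 1 - m) (0:Int) = 0 :: List.replicate (cs.length - m) 0 := by
    rw [show cs.length + 1 - m = (cs.length - m) + 1 by omega, List.replicate_succ]
  have hrepb : List.replicate (cs.length + 1 - m) false = false :: List.replicate (cs.length - m) false := by
    rw [show cs.length + 1 - m = (cs.length - m) + 1 by omega, List.replicate_succ]
  have hRG : ((List.range m).map (pvG cs parts)).length = m := by simp
  have hsl : PySem.List.slice cs none (some (m : Int)) = cs.take m :=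
    PySem.List.slice_to_natCast cs m
  have hget1 : PySem.List.pyGetD (pvA cs parts m).1 (m : Int) 0 = 0 := by
    rw [PySem.List.pyGetD_natCast]
    show (pvTbl cs parts m ++ List.replicate (cs.length + 1 - m) 0).getD m 0 = 0
    rw [List.getD_eq_getElem?_getD, List.getElem?_append_right (by omega), hT, hrep]
    simp
  have hget2 : PySem.List.pyGetD (pvA cs parts m).2 (m : Int) false = false := by
    rw [PySem.List.pyGetD_natCast]
    show ((List.range m).map (pvG cs parts) ++ List.replicate (cs.length + 1 - m) false).getD m false = false
    rw [List.getD_eq_getElem?_getD, List.getElem?_append_right (by omega), hRG, hrepb]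
    simp
  have hvals : ∀ p ∈ parts.filter (fun p => PySem.Chars.endswith (cs.take m) p.toList),
      PySem.List.pyGetD (pvA cs parts m).1 ((m : Int) - (p.toList.length : Int)) 0 =
        (pvTbl cs parts m ++ [if m = 0 then (1:Int) else 0]).getD (m - p.toList.length) 0 := by
    intro p hp
    rw [List.mem_filter] at hp
    have hple := ((pv_endswith_iff cs p.toList m hm).mp hp.2).1
    rw [show (m : Int) - (p.toList.length : Int) = ((m - p.toList.length : Nat) : Int) by
      push_cast [Nat.cast_sub hple]; ring]
    rw [PySem.List.pyGetD_natCast]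
    show (pvTbl cs parts m ++ List.replicate (cs.length + 1 - m) 0).getD (m - p.toList.length) 0 = _
    by_cases hL : p.toList.length = 0
    · rw [hL, Nat.sub_zero, pv_getD_concat' hT]
      rw [List.getD_eq_getElem?_getD, List.getElem?_append_right (by omega), hT, hrep]
      simp [hm0]
    · rw [pv_getD_append_left 0 (by omega), pv_getD_append_left 0 (by omega)]
  have hval : PySem.List.pyGetD (pvA cs parts m).1 (m : Int) 0 +
      ((parts.filter (fun p => PySem.Chars.endswith (cs.take m) p.toList)).map
        (fun p => PySem.List.pyGetD (pvA cs parts m).1 ((m : Int) - (p.toList.length : Int)) 0)).sum =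
      (if m = 0 then (1:Int) else 0) +
      ((parts.filter (fun p => PySem.Chars.endswith (cs.take m) p.toList)).map
        (fun p => (pvTbl cs parts m ++ [if m = 0 then (1:Int) else 0]).getD
          (m - p.toList.length) 0)).sum := by
    rw [hget1, List.map_congr_left hvals]
    simp [hm0]
  have hset1 : PySem.List.pySetD (pvA cs parts m).1 (m : Int)
      (PySem.List.pyGetD (pvA cs parts m).1 (m : Int) 0 +
        ((parts.filter (fun p => PySem.Chars.endswith (cs.take m) p.toList)).map
          (fun p => PySem.List.pyGetD (pvA cs parts m).1 ((m : Int) - (p.toList.length : Int)) 0)).sum) =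
      pvTbl cs parts (m + 1) ++ List.replicate (cs.length + 1 - (m + 1)) 0 := by
    rw [hval, pv_pySetD_natCast _ _ _ (by simp [pvA, hT]; omega)]
    show (pvTbl cs parts m ++ List.replicate (cs.length + 1 - m) 0).set m _ = _
    rw [hrep, pv_set_mid' hT]
    conv_rhs => rw [pvTbl]
    rw [List.append_assoc]
    simp [show cs.length + 1 - (m + 1) = cs.length - m by omega]
  have hvals1 : ∀ p ∈ parts.filter (fun p => PySem.Chars.endswith (cs.take m) p.toList),
      PySem.List.pyGetD (pvTbl cs parts (m + 1) ++ List.replicate (cs.length + 1 - (m + 1)) 0)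
        ((m : Int) - (p.toList.length : Int)) 0 = pvF cs parts (m - p.toList.length) := by
    intro p hp
    rw [List.mem_filter] at hp
    have hple := ((pv_endswith_iff cs p.toList m hm).mp hp.2).1
    rw [show (m : Int) - (p.toList.length : Int) = ((m - p.toList.length : Nat) : Int) by
      push_cast [Nat.cast_sub hple]; ring]
    rw [PySem.List.pyGetD_natCast,
      pv_getD_append_left 0 (by rw [pvTbl_length]; omega),
      pvTbl_getD cs parts (by omega)]
  have hany : ((parts.filter (fun p => PySem.Chars.endswith (cs.take m) p.toList)).map
      (fun p => PySem.List.pyGetD (pvTbl cs parts (m + 1) ++ List.replicate (cs.length + 1 - (m + 1)) 0)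
        ((m : Int) - (p.toList.length : Int)) 0)).any (fun x => decide (x ≠ 0)) = pvG cs parts m := by
    rw [List.map_congr_left hvals1, List.any_map]
    simp [pvG, hm0, Function.comp]
  have hset2 : PySem.List.pySetD (pvA cs parts m).2 (m : Int)
      (PySem.List.pyGetD (pvA cs parts m).2 (m : Int) false || pvG cs parts m) =
      (List.range (m + 1)).map (pvG cs parts) ++ List.replicate (cs.length + 1 - (m + 1)) false := by
    rw [hget2, Bool.false_or, pv_pySetD_natCast _ _ _ (by simp [pvA]; omega)]
    show ((List.range m).map (pvG cs parts) ++ List.replicate (cs.length + 1 - m) false).set m _ = _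
    rw [hrepb, pv_set_mid' hRG, List.range_succ, List.map_append]
    simp [show cs.length + 1 - (m + 1) = cs.length - m by omega]
  unfold stepA
  simp only [hsl]
  rw [hset1, hany, hset2]
  rfl

theorem pvA_loop (cs : List Char) (parts : List String) :
    ∀ m : Nat, 1 ≤ m → m ≤ cs.length + 1 →
    (PySem.List.pyRange 0 (m : Int) 1).foldl (stepA cs parts)
      ((List.replicate (cs.length + 1) 0).set 0 1, (List.replicate (cs.length + 1) false).set 0 true)
      = pvA cs parts m := by
  intro m
  induction m with
  | zero => omega
  | succ m ih =>
    intro _ hm1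
    rcases Nat.eq_zero_or_pos m with rfl | hmpos
    · rw [show ((0 + 1 : Nat) : Int) = 0 + 1 by norm_num, PySem.List.pyRange_one_singleton,
        List.foldl_cons, List.foldl_nil]
      unfold stepA
      have hz : PySem.List.slice cs none (some (0 : Int)) = cs.take 0 := by
        simpa using PySem.List.slice_to_natCast cs 0
      simp only [hz]
      have hd0 : (List.replicate (cs.length + 1) (0:Int)).set 0 1 = 1 :: List.replicate cs.length 0 := by
        rw [List.replicate_succ, List.set_cons_zero]
      have hb0 : (List.replicate (cs.length + 1) false).set 0 true = true :: List.replicate cs.length false := by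
        rw [List.replicate_succ, List.set_cons_zero]
      have hvals : ∀ p ∈ parts.filter (fun p => PySem.Chars.endswith (cs.take 0) p.toList),
          PySem.List.pyGetD ((List.replicate (cs.length + 1) (0:Int)).set 0 1)
            ((0 : Int) - (p.toList.length : Int)) 0 =
          (pvTbl cs parts 0 ++ [(1:Int)]).getD (0 - p.toList.length) 0 := by
        intro p hp
        have hL := pv_filter_zero_mem hp
        rw [hL]
        simp only [List.length_nil, Nat.cast_zero, sub_zero, Nat.sub_zero]
        rw [hd0, PySem.List.pyGetD_zero]
        simp [pvTbl]
      have hent : PySem.List.pyGetD ((List.replicate (cs.length + 1) (0:Int)).set 0 1) 0 0 +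
          ((parts.filter (fun p => PySem.Chars.endswith (cs.take 0) p.toList)).map
            (fun p => PySem.List.pyGetD ((List.replicate (cs.length + 1) (0:Int)).set 0 1)
              ((0 : Int) - (p.toList.length : Int)) 0)).sum =
          pvF cs parts 0 := by
        rw [List.map_congr_left hvals, hd0, PySem.List.pyGetD_zero, List.getD_cons_zero,
          pvF_eq, if_pos rfl]
      have hset1 : PySem.List.pySetD ((List.replicate (cs.length + 1) (0:Int)).set 0 1) 0
          (PySem.List.pyGetD ((List.replicate (cs.length + 1) (0:Int)).set 0 1) 0 0 +
            ((parts.filter (fun p => PySem.Chars.endswith (cs.take 0) p.toList)).map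
              (fun p => PySem.List.pyGetD ((List.replicate (cs.length + 1) (0:Int)).set 0 1)
                ((0 : Int) - (p.toList.length : Int)) 0)).sum) =
          pvTbl cs parts 1 ++ List.replicate (cs.length + 1 - 1) 0 := by
        rw [hent, hd0, pv_pySetD_zero _ _ (by simp), List.set_cons_zero]
        have htbl : pvTbl cs parts 1 = [pvF cs parts 0] := by
          have hl := pvTbl_length cs parts 1
          have hg : (pvTbl cs parts 1).getD 0 0 = pvF cs parts 0 := rfl
          cases he : pvTbl cs parts 1 with
          | nil => rw [he] at hl; simp at hl
          | cons a t =>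
            rw [he] at hl hg
            simp at hl
            rw [List.getD_cons_zero] at hg
            rw [hl, hg]
        rw [htbl]
        simp
      have hvals1 : ∀ p ∈ parts.filter (fun p => PySem.Chars.endswith (cs.take 0) p.toList),
          PySem.List.pyGetD (pvTbl cs parts 1 ++ List.replicate (cs.length + 1 - 1) 0)
            ((0 : Int) - (p.toList.length : Int)) 0 = pvF cs parts (0 - p.toList.length) := by
        intro p hp
        have hL := pv_filter_zero_mem hp
        rw [hL]
        simp only [List.length_nil, Nat.cast_zero, sub_zero, Nat.sub_zero]
        rw [PySem.List.pyGetD_zero, pv_getD_append_left 0 (by rw [pvTbl_length]; omega)]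
        exact pvTbl_getD cs parts (by omega)
      have hany : ((parts.filter (fun p => PySem.Chars.endswith (cs.take 0) p.toList)).map
          (fun p => PySem.List.pyGetD (pvTbl cs parts 1 ++ List.replicate (cs.length + 1 - 1) 0)
            ((0 : Int) - (p.toList.length : Int)) 0)).any (fun x => decide (x ≠ 0)) =
          ((parts.filter (fun p => PySem.Chars.endswith (cs.take 0) p.toList)).any
            (fun p => decide (pvF cs parts (0 - p.toList.length) ≠ 0))) := by
        rw [List.map_congr_left hvals1, List.any_map]
        rfl
      have hset2 : PySem.List.pySetD ((List.replicate (cs.length + 1) false).set 0 true) 0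
          (PySem.List.pyGetD ((List.replicate (cs.length + 1) false).set 0 true) 0 false ||
            ((parts.filter (fun p => PySem.Chars.endswith (cs.take 0) p.toList)).any
              (fun p => decide (pvF cs parts (0 - p.toList.length) ≠ 0)))) =
          (List.range 1).map (pvG cs parts) ++ List.replicate (cs.length + 1 - 1) false := by
        rw [hb0, PySem.List.pyGetD_zero, List.getD_cons_zero, Bool.true_or,
          pv_pySetD_zero _ _ (by simp), List.set_cons_zero, List.range_one]
        simp [pvG]
      rw [hset1, hany, hset2]
      rfl
    · rw [show ((m + 1 : Nat) : Int) = (m : Int) + 1 by push_cast; ring,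
        PySem.List.pyRange_one_succ_right (by omega), List.foldl_append,
        ih hmpos (by omega), List.foldl_cons, List.foldl_nil]
      exact pv_stepA cs parts hmpos (by omega)

theorem pv_A_result (s : String) (parts : List String) :
    check_str_both s parts =
      (pvF s.toList parts s.toList.length, pvG s.toList parts s.toList.length) := by
  unfold check_str_both
  show (PySem.List.pyGetD ((PySem.List.pyRange 0 ((s.toList.length : Int) + 1) 1).foldl
        (stepA s.toList parts)
        ((List.replicate (s.toList.length + 1) 0).set 0 1,
         (List.replicate (s.toList.length + 1) false).set 0 true)).1 (s.toList.length : Int) 0,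
      PySem.List.pyGetD ((PySem.List.pyRange 0 ((s.toList.length : Int) + 1) 1).foldl
        (stepA s.toList parts)
        ((List.replicate (s.toList.length + 1) 0).set 0 1,
         (List.replicate (s.toList.length + 1) false).set 0 true)).2 (s.toList.length : Int) false) = _
  have hc : ((s.toList.length : Int) + 1) = ((s.toList.length + 1 : Nat) : Int) := by
    push_cast; ring
  rw [hc, pvA_loop s.toList parts (s.toList.length + 1) (by omega) (by omega)]
  unfold pvA
  simp only [Nat.sub_self, List.replicate_zero, List.append_nil]
  refine Prod.ext_iff.mpr ⟨?_, ?_⟩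
  · show PySem.List.pyGetD (pvTbl s.toList parts (s.toList.length + 1)) (s.toList.length : Int) 0 = _
    rw [PySem.List.pyGetD_natCast]
    rfl
  · show PySem.List.pyGetD ((List.range (s.toList.length + 1)).map (pvG s.toList parts))
      (s.toList.length : Int) false = _
    rw [PySem.List.pyGetD_natCast, List.getD_eq_getElem?_getD, List.getElem?_map,
      List.getElem?_range (by omega)]
    rfl

-- ===== B-side: arrival counts and the factorization pvF = (1 + #empty parts) · pvArr =====

-- pvArr j = number of tilings of s[:j] by NONEMPTY parts (the values B's snapshot propagates)
def pvArrT (cs : List Char) (parts : List String) : Nat → List Int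
  | 0 => []
  | k+1 =>
    let t := pvArrT cs parts k
    t ++ [(if k = 0 then (1:Int) else 0) +
      ((parts.filter (fun p => PySem.Chars.endswith (cs.take k) p.toList && !p.toList.isEmpty)).map
        (fun p => t.getD (k - p.toList.length) 0)).sum]

def pvArr (cs : List Char) (parts : List String) (k : Nat) : Int :=
  (pvArrT cs parts (k+1)).getD k 0

-- number of empty strings among the parts
def pvME (parts : List String) : Nat := (parts.filter (fun p => p.toList.isEmpty)).length

theorem pvArrT_length (cs : List Char) (parts : List String) (k : Nat) :
    (pvArrT cs parts k).length = k := by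
  induction k with
  | zero => rfl
  | succ k ih => simp [pvArrT, ih]

theorem pvArrT_getD (cs : List Char) (parts : List String) {j k : Nat} (h : j < k) :
    (pvArrT cs parts k).getD j 0 = pvArr cs parts j := by
  induction k with
  | zero => omega
  | succ k ih =>
    rcases Nat.lt_or_ge j k with hj | hj
    · conv_lhs => rw [pvArrT]
      rw [pv_getD_append_left 0 (by rw [pvArrT_length]; exact hj)]
      exact ih hj
    · have hjk : j = k := by omega
      subst hjk
      rfl

-- a nonempty part matching the k-prefix forces 1 ≤ |p| ≤ k
theorem pv_mem_filter_ne {cs : List Char} {parts : List String} {k : Nat} {p : String}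
    (hp : p ∈ parts.filter
      (fun p => PySem.Chars.endswith (cs.take k) p.toList && !p.toList.isEmpty)) :
    1 ≤ p.toList.length ∧ p.toList.length ≤ k := by
  rw [List.mem_filter, Bool.and_eq_true] at hp
  obtain ⟨-, he, hne⟩ := hp
  have hL : p.toList ≠ [] := by
    intro h
    rw [h] at hne
    simp at hne
  have hlen : 1 ≤ p.toList.length := by
    cases hq : p.toList with
    | nil => exact absurd hq hL
    | cons a t => simp [hq]
  refine ⟨hlen, ?_⟩
  rw [PySem.Chars.endswith_iff] at he
  have := he.length_le
  rw [List.length_take] at this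
  omega

theorem pvArr_eq (cs : List Char) (parts : List String) (k : Nat) :
    pvArr cs parts k = (if k = 0 then (1:Int) else 0) +
      ((parts.filter (fun p => PySem.Chars.endswith (cs.take k) p.toList && !p.toList.isEmpty)).map
        (fun p => pvArr cs parts (k - p.toList.length))).sum := by
  unfold pvArr
  conv_lhs => rw [pvArrT]
  rw [pv_getD_concat' (pvArrT_length cs parts k)]
  congr 1
  refine congrArg List.sum (List.map_congr_left ?_)
  intro p hp
  obtain ⟨h1, h2⟩ := pv_mem_filter_ne hp
  exact pvArrT_getD cs parts (by omega)

-- splitting a filtered sum along a second predicate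
theorem pv_sum_filter_split (l : List String) (q r : String → Bool) (f : String → Int) :
    ((l.filter q).map f).sum =
      ((l.filter (fun p => q p && r p)).map f).sum +
      ((l.filter (fun p => q p && !r p)).map f).sum := by
  induction l with
  | nil => rfl
  | cons a l ih =>
    by_cases hq : q a = true
    · by_cases hr : r a = true
      · simp [hq, hr, ih]; ring
      · simp [hq, hr, ih]; ring
    · simp [hq, ih]

-- every empty part matches every prefix, so the "matching and empty" filter is the empty filter
theorem pv_filter_empty_eq (parts : List String) (pre : List Char) :
    parts.filter (fun p => PySem.Chars.endswith pre p.toList && p.toList.isEmpty) =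
      parts.filter (fun p => p.toList.isEmpty) := by
  apply List.filter_congr
  intro p _
  by_cases h : p.toList.isEmpty = true
  · have hnil : p.toList = [] := by simpa [List.isEmpty_iff] using h
    have : PySem.Chars.endswith pre p.toList = true := by
      rw [hnil, PySem.Chars.endswith_iff]
      exact List.nil_suffix
    simp [h, this]
  · simp [h]

theorem pv_pvF_factor (cs : List Char) (parts : List String) :
    ∀ k, k ≤ cs.length → pvF cs parts k = (1 + (pvME parts : Int)) * pvArr cs parts k := by
  intro k
  induction k using Nat.strong_induction_on with
  | _ k ih =>
    intro hk
    rw [pvF_eq, pv_sum_filter_split parts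
      (fun p => PySem.Chars.endswith (cs.take k) p.toList) (fun p => p.toList.isEmpty)]
    rcases Nat.eq_zero_or_pos k with rfl | hkpos
    · -- k = 0: only empty parts match; each reads the appended 1
      have hno : parts.filter
          (fun p => PySem.Chars.endswith (cs.take 0) p.toList && !p.toList.isEmpty) = [] := by
        rw [List.filter_eq_nil_iff]
        intro p hp hc
        rw [Bool.and_eq_true] at hc
        have hnil : p.toList = [] := by
          have := hc.1
          rwa [List.take_zero, PySem.Chars.endswith_iff, List.suffix_nil] at this
        rw [hnil] at hc
        simp at hc
      have hemp : ∀ p ∈ parts.filter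
          (fun p => PySem.Chars.endswith (cs.take 0) p.toList && p.toList.isEmpty),
          (pvTbl cs parts 0 ++ [if (0:Nat) = 0 then (1:Int) else 0]).getD
            (0 - p.toList.length) 0 = 1 := by
        intro p hp
        rw [List.mem_filter, Bool.and_eq_true] at hp
        have hnil : p.toList = [] := by simpa [List.isEmpty_iff] using hp.2.2
        rw [hnil]
        simp [pvTbl]
      rw [List.map_congr_left hemp, hno, pv_filter_empty_eq]
      have hsum : ((parts.filter (fun p => p.toList.isEmpty)).map
          (fun _ => (1:Int))).sum = (pvME parts : Int) := by
        rw [List.map_const', List.sum_replicate, pvME]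
        simp
      rw [hsum]
      have harr : pvArr cs parts 0 = 1 := by
        rw [pvArr_eq, hno]
        simp
      rw [harr]
      simp
    · have hk0 : ¬ (k = 0) := by omega
      -- empty parts read the appended pre-update cell, which is 0
      have hemp : ∀ p ∈ parts.filter
          (fun p => PySem.Chars.endswith (cs.take k) p.toList && p.toList.isEmpty),
          (pvTbl cs parts k ++ [if k = 0 then (1:Int) else 0]).getD
            (k - p.toList.length) 0 = 0 := by
        intro p hp
        rw [List.mem_filter, Bool.and_eq_true] at hp
        have hnil : p.toList = [] := by simpa [List.isEmpty_iff] using hp.2.2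
        rw [hnil]
        simp only [List.length_nil, Nat.sub_zero]
        rw [pv_getD_concat' (pvTbl_length cs parts k)]
        simp [hk0]
      -- nonempty parts read final cells, to which the IH applies
      have hne : ∀ p ∈ parts.filter
          (fun p => PySem.Chars.endswith (cs.take k) p.toList && !p.toList.isEmpty),
          (pvTbl cs parts k ++ [if k = 0 then (1:Int) else 0]).getD
            (k - p.toList.length) 0 =
            (1 + (pvME parts : Int)) * pvArr cs parts (k - p.toList.length) := by
        intro p hp
        obtain ⟨h1, h2⟩ := pv_mem_filter_ne hp
        rw [pv_getD_append_left _ (by rw [pvTbl_length]; omega),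
          pvTbl_getD cs parts (by omega), ih (k - p.toList.length) (by omega) (by omega)]
      rw [List.map_congr_left hemp, List.map_congr_left hne]
      rw [List.sum_map_mul_left]
      have hz : ((parts.filter
          (fun p => PySem.Chars.endswith (cs.take k) p.toList && p.toList.isEmpty)).map
          (fun _ => (0:Int))).sum = 0 := by
        rw [List.map_const', List.sum_replicate]
        simp
      rw [hz]
      rw [pvArr_eq cs parts k]
      simp [hk0]

-- ===== B-side loop invariant =====

-- the state of B's array after the outer iterations i < m: position j has received the
-- pushes from all origins j - |p| < m (plus the initial 1 at position 0)
def pvC (cs : List Char) (parts : List String) (m : Nat) : List Int :=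
  (List.range (cs.length + 1)).map (fun j =>
    (if j = 0 then (1:Int) else 0) +
    ((parts.filter (fun p => PySem.Chars.endswith (cs.take j) p.toList &&
        decide (j < m + p.toList.length))).map
      (fun p => pvArr cs parts (j - p.toList.length))).sum)

theorem pvC_length (cs : List Char) (parts : List String) (m : Nat) :
    (pvC cs parts m).length = cs.length + 1 := by
  simp [pvC]

theorem pvC_getD (cs : List Char) (parts : List String) (m j : Nat) (hj : j ≤ cs.length) :
    (pvC cs parts m).getD j 0 =
      (if j = 0 then (1:Int) else 0) +
      ((parts.filter (fun p => PySem.Chars.endswith (cs.take j) p.toList &&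
          decide (j < m + p.toList.length))).map
        (fun p => pvArr cs parts (j - p.toList.length))).sum := by
  unfold pvC
  rw [List.getD_eq_getElem?_getD, List.getElem?_map, List.getElem?_range (by omega)]
  rfl

theorem pvC_zero (cs : List Char) (parts : List String) :
    pvC cs parts 0 = (List.replicate (cs.length + 1) 0).set 0 1 := by
  apply List.ext_getElem
  · simp [pvC_length]
  · intro j h1 h2
    have hj : j ≤ cs.length := by
      have := pvC_length cs parts 0
      omega
    have hfil : parts.filter (fun p => PySem.Chars.endswith (cs.take j) p.toList &&
        decide (j < 0 + p.toList.length)) = [] := by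
      rw [List.filter_eq_nil_iff]
      intro p hp hc
      rw [Bool.and_eq_true] at hc
      have hle : p.toList.length ≤ j := by
        rw [PySem.Chars.endswith_iff] at hc
        have := hc.1.length_le
        rw [List.length_take] at this
        omega
      have := of_decide_eq_true hc.2
      omega
    have hl : (pvC cs parts 0)[j] = (pvC cs parts 0).getD j 0 := by
      rw [List.getD_eq_getElem?_getD, List.getElem?_eq_getElem h1]
      rfl
    rw [hl, pvC_getD cs parts 0 j hj, hfil]
    rcases Nat.eq_zero_or_pos j with rfl | hjp
    · simp [List.replicate_succ]
    · have hj0 : ¬ (j = 0) := by omega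
      simp [hj0]
      rw [List.getElem_set_ne (by omega)]
      simp [List.getElem_replicate]

-- B's snapshot at position m is the arrival count pvArr m
theorem pvC_snapshot (cs : List Char) (parts : List String) (m : Nat) (hm : m ≤ cs.length) :
    (pvC cs parts m).getD m 0 = pvArr cs parts m := by
  rw [pvC_getD cs parts m m hm, pvArr_eq cs parts m]
  congr 1
  refine congrArg List.sum (congrArg _ (List.filter_congr ?_))
  intro p _
  by_cases h : p.toList.isEmpty = true
  · have h0 : p.toList.length = 0 := by simpa [List.isEmpty_iff] using h
    simp [h, h0]
  · have h0 : p.toList.length ≠ 0 := by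
      intro hc
      rw [List.length_eq_zero_iff] at hc
      simp [hc] at h
    have h1 : decide (m < m + p.toList.length) = true := by
      rw [decide_eq_true_eq]
      omega
    have h2 : (!p.toList.isEmpty) = true := by simp [h]
    rw [h1, h2]

-- entry-wise effect of folding B's pushes over the parts
theorem pv_push_fold (cs : List Char) (m : Nat) (ci : Int) :
    ∀ (ps : List String) (c : List Int), c.length = cs.length + 1 →
      (ps.foldl (pushB cs (m : Int) ci) c).length = c.length ∧
      ∀ j : Nat, j ≤ cs.length →
        (ps.foldl (pushB cs (m : Int) ci) c).getD j 0 = c.getD j 0 +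
          ci * ((ps.filter (fun p =>
            (decide ((m : Int) + (p.toList.length : Int) ≤ (cs.length : Int)) &&
              startsAt cs p.toList (m : Int)) && decide (m + p.toList.length = j))).length : Int) := by
  intro ps
  induction ps with
  | nil => intro c hc; exact ⟨rfl, by intro j hj; simp⟩
  | cons p ps ih =>
    intro c hc
    by_cases hcond : ((m : Int) + (p.toList.length : Int) ≤ (cs.length : Int) ∧
        startsAt cs p.toList (m : Int) = true)
    · have hbool : ((m : Int) + (p.toList.length : Int) ≤ (cs.length : Int) &&
          startsAt cs p.toList (m : Int) : Bool) = true := by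
        rw [Bool.and_eq_true]
        exact ⟨decide_eq_true hcond.1, hcond.2⟩
      have hjn : m + p.toList.length ≤ cs.length := by
        have := hcond.1
        omega
      have hpush : pushB cs (m : Int) ci c p =
          c.set (m + p.toList.length) (c.getD (m + p.toList.length) 0 + ci) := by
        show (if ((decide ((m : Int) + (p.toList.length : Int) ≤ (cs.length : Int)) &&
            startsAt cs p.toList (m : Int)) = true) then
            PySem.List.pySetD c ((m : Int) + (p.toList.length : Int))
              (PySem.List.pyGetD c ((m : Int) + (p.toList.length : Int)) 0 + ci)
          else c) = _
        rw [hbool, if_pos rfl]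
        have hcast : (m : Int) + (p.toList.length : Int) = ((m + p.toList.length : Nat) : Int) := by
          push_cast; ring
        rw [hcast, PySem.List.pyGetD_natCast, pv_pySetD_natCast _ _ _ (by omega)]
      have hlen' : (c.set (m + p.toList.length) (c.getD (m + p.toList.length) 0 + ci)).length =
          cs.length + 1 := by simp [hc]
      obtain ⟨ihl, ihe⟩ := ih _ hlen'
      constructor
      · rw [List.foldl_cons, hpush, ihl, List.length_set, hc]
      · intro j hj
        rw [List.foldl_cons, hpush, ihe j hj]
        have hget : (c.set (m + p.toList.length) (c.getD (m + p.toList.length) 0 + ci)).getD j 0 =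
            c.getD j 0 + (if m + p.toList.length = j then ci else 0) := by
          by_cases hje : m + p.toList.length = j
          · subst hje
            rw [List.getD_eq_getElem?_getD,
              List.getElem?_set_eq_of_lt _ (by omega : m + p.toList.length < c.length),
              Option.getD_some, if_pos rfl]
          · rw [List.getD_eq_getElem?_getD, List.getElem?_set_ne hje,
              ← List.getD_eq_getElem?_getD, if_neg hje, add_zero]
        rw [hget, List.filter_cons]
        by_cases hje : m + p.toList.length = j
        · have hcb : ((decide ((m : Int) + (p.toList.length : Int) ≤ (cs.length : Int)) &&
              startsAt cs p.toList (m : Int)) && decide (m + p.toList.length = j)) = true := by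
            rw [hbool, decide_eq_true hje]
            rfl
          rw [if_pos hje, if_pos hcb, List.length_cons]
          push_cast
          ring
        · have hcb : ¬ (((decide ((m : Int) + (p.toList.length : Int) ≤ (cs.length : Int)) &&
              startsAt cs p.toList (m : Int)) && decide (m + p.toList.length = j)) = true) := by
            rw [hbool, decide_eq_false hje]
            simp
          rw [if_neg hje, if_neg hcb, add_zero]
    · have hbool : ((m : Int) + (p.toList.length : Int) ≤ (cs.length : Int) &&
          startsAt cs p.toList (m : Int) : Bool) = false := by
        cases h1 : (decide ((m : Int) + (p.toList.length : Int) ≤ (cs.length : Int)) : Bool) with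
        | false => exact Bool.false_and _
        | true =>
          have h2 : startsAt cs p.toList (m : Int) = false := by
            rcases not_and_or.mp hcond with h | h
            · exact absurd (of_decide_eq_true h1) h
            · exact eq_false_of_ne_true h
          rw [h2, Bool.and_false]
      have hpush : pushB cs (m : Int) ci c p = c := by
        show (if ((decide ((m : Int) + (p.toList.length : Int) ≤ (cs.length : Int)) &&
            startsAt cs p.toList (m : Int)) = true) then
            PySem.List.pySetD c ((m : Int) + (p.toList.length : Int))
              (PySem.List.pyGetD c ((m : Int) + (p.toList.length : Int)) 0 + ci)
          else c) = c
        rw [hbool]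
        rfl
      obtain ⟨ihl, ihe⟩ := ih _ hc
      constructor
      · rw [List.foldl_cons, hpush, ihl]
      · intro j hj
        have hcb : ¬ (((decide ((m : Int) + (p.toList.length : Int) ≤ (cs.length : Int)) &&
            startsAt cs p.toList (m : Int)) && decide (m + p.toList.length = j)) = true) := by
          rw [hbool, Bool.false_and]
          exact Bool.false_ne_true
        rw [List.foldl_cons, hpush, ihe j hj, List.filter_cons, if_neg hcb]

-- the push condition at origin m targeting j ≤ |s| is exactly "p matches the j-prefix and j = m + |p|"
theorem pv_push_cond (cs : List Char) (m j : Nat) (hj : j ≤ cs.length) (p : String) :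
    ((decide ((m : Int) + (p.toList.length : Int) ≤ (cs.length : Int)) &&
        startsAt cs p.toList (m : Int)) && decide (m + p.toList.length = j)) =
    (PySem.Chars.endswith (cs.take j) p.toList && decide (j = m + p.toList.length)) := by
  by_cases hje : m + p.toList.length = j
  · have hle : (m : Int) + (p.toList.length : Int) ≤ (cs.length : Int) := by
      push_cast
      omega
    have hstar : startsAt cs p.toList (m : Int) =
        PySem.Chars.endswith (cs.take j) p.toList := by
      unfold startsAt
      rw [PySem.List.slice_from_natCast]
      have he : PySem.Chars.endswith (cs.take j) p.toList = true ↔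
          p.toList.length ≤ j ∧ p.toList.isPrefixOf (cs.drop (j - p.toList.length)) = true :=
        pv_endswith_iff cs p.toList j hj
      have hm : j - p.toList.length = m := by omega
      rw [hm] at he
      by_cases hs : PySem.Chars.startswith (cs.drop m) p.toList = true
      · rw [hs]
        symm
        rw [he]
        refine ⟨by omega, ?_⟩
        rw [List.isPrefixOf_iff_prefix]
        rwa [PySem.Chars.startswith_iff] at hs
      · rw [eq_false_of_ne_true hs]
        symm
        rw [Bool.eq_false_iff]
        intro hc
        apply hs
        rw [PySem.Chars.startswith_iff, ← List.isPrefixOf_iff_prefix]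
        exact (he.mp hc).2
    rw [hstar, decide_eq_true hle, Bool.true_and, decide_eq_true hje,
      decide_eq_true (show j = m + p.toList.length from hje.symm)]
  · have hje' : ¬ (j = m + p.toList.length) := by omega
    rw [decide_eq_false hje, decide_eq_false hje', Bool.and_false, Bool.and_false]

-- advancing the invariant by one outer iteration
theorem pv_stepB (cs : List Char) (parts : List String) (m : Nat) (hm : m ≤ cs.length) :
    stepB cs parts (pvC cs parts m) (m : Int) = pvC cs parts (m + 1) := by
  have hsnap : PySem.List.pyGetD (pvC cs parts m) (m : Int) 0 = pvArr cs parts m := by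
    rw [PySem.List.pyGetD_natCast]
    exact pvC_snapshot cs parts m hm
  -- target identity: the next state entry-wise
  have htarget : ∀ j : Nat, j ≤ cs.length →
      (pvC cs parts (m + 1)).getD j 0 = (pvC cs parts m).getD j 0 +
        pvArr cs parts m * ((parts.filter (fun p =>
          PySem.Chars.endswith (cs.take j) p.toList && decide (j = m + p.toList.length))).length : Int) := by
    intro j hj
    rw [pvC_getD cs parts (m+1) j hj, pvC_getD cs parts m j hj]
    have hsplit : ((parts.filter (fun p => PySem.Chars.endswith (cs.take j) p.toList &&
          decide (j < m + 1 + p.toList.length))).map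
          (fun p => pvArr cs parts (j - p.toList.length))).sum =
        ((parts.filter (fun p => PySem.Chars.endswith (cs.take j) p.toList &&
          decide (j < m + p.toList.length))).map
          (fun p => pvArr cs parts (j - p.toList.length))).sum +
        ((parts.filter (fun p => PySem.Chars.endswith (cs.take j) p.toList &&
          decide (j = m + p.toList.length))).map
          (fun p => pvArr cs parts (j - p.toList.length))).sum := by
      rw [pv_sum_ite_filter, pv_sum_ite_filter, pv_sum_ite_filter, ← List.sum_map_add]
      refine congrArg List.sum (List.map_congr_left ?_)
      intro p _
      by_cases he : PySem.Chars.endswith (cs.take j) p.toList = true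
      · by_cases h2 : j < m + p.toList.length
        · rw [he, decide_eq_true h2,
            decide_eq_true (show j < m + 1 + p.toList.length by omega),
            decide_eq_false (show ¬ j = m + p.toList.length by omega)]
          simp
        · by_cases h3 : j = m + p.toList.length
          · rw [he, decide_eq_false h2, decide_eq_true h3,
              decide_eq_true (show j < m + 1 + p.toList.length by omega)]
            simp
          · rw [he, decide_eq_false h2, decide_eq_false h3,
              decide_eq_false (show ¬ j < m + 1 + p.toList.length by omega)]
            simp
      · rw [eq_false_of_ne_true he]
        simp
    rw [hsplit]
    have hconst : ((parts.filter (fun p => PySem.Chars.endswith (cs.take j) p.toList &&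
          decide (j = m + p.toList.length))).map
          (fun p => pvArr cs parts (j - p.toList.length))).sum =
        pvArr cs parts m * ((parts.filter (fun p => PySem.Chars.endswith (cs.take j) p.toList &&
          decide (j = m + p.toList.length))).length : Int) := by
      have hcg : ∀ p ∈ parts.filter (fun p => PySem.Chars.endswith (cs.take j) p.toList &&
          decide (j = m + p.toList.length)),
          pvArr cs parts (j - p.toList.length) = (fun _ : String => pvArr cs parts m) p := by
        intro p hp
        rw [List.mem_filter, Bool.and_eq_true] at hp
        have := of_decide_eq_true hp.2.2
        show pvArr cs parts (j - p.toList.length) = pvArr cs parts m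
        congr 1
        omega
      rw [List.map_congr_left hcg, List.map_const', List.sum_replicate, nsmul_eq_mul, mul_comm]
    rw [hconst]
    ring
  -- execute the step
  unfold stepB
  have hrun : parts.foldl (pushB cs (m : Int) (pvArr cs parts m)) (pvC cs parts m) =
      pvC cs parts (m + 1) := by
    obtain ⟨hl, hent⟩ := pv_push_fold cs m (pvArr cs parts m) parts (pvC cs parts m)
      (pvC_length cs parts m)
    apply List.ext_getElem
    · rw [hl, pvC_length, pvC_length]
    · intro j h1 h2
      have hj : j ≤ cs.length := by
        rw [hl, pvC_length] at h1
        omega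
      have hgl : ∀ (L : List Int) (hL : j < L.length), L[j] = L.getD j 0 := by
        intro L hL
        rw [List.getD_eq_getElem?_getD, List.getElem?_eq_getElem hL]
        rfl
      have hfe : parts.filter (fun p =>
            (decide ((m : Int) + (p.toList.length : Int) ≤ (cs.length : Int)) &&
              startsAt cs p.toList (m : Int)) && decide (m + p.toList.length = j)) =
          parts.filter (fun p => PySem.Chars.endswith (cs.take j) p.toList &&
            decide (j = m + p.toList.length)) :=
        List.filter_congr (fun p _ => pv_push_cond cs m j hj p)
      rw [hgl _ h1, hgl _ h2, hent j hj, htarget j hj, hfe]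
  simp only [hsnap]
  by_cases hz : pvArr cs parts m ≠ 0
  · rw [if_pos hz]
    exact hrun
  · rw [if_neg hz]
    push Not at hz
    apply List.ext_getElem
    · rw [pvC_length, pvC_length]
    · intro j h1 h2
      have hj : j ≤ cs.length := by
        rw [pvC_length] at h1
        omega
      have hgl : ∀ (L : List Int) (hL : j < L.length), L[j] = L.getD j 0 := by
        intro L hL
        rw [List.getD_eq_getElem?_getD, List.getElem?_eq_getElem hL]
        rfl
      rw [hgl _ h1, hgl _ h2, htarget j hj, hz]
      ring

theorem pvC_loop (cs : List Char) (parts : List String) :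
    ∀ m : Nat, m ≤ cs.length + 1 →
    (PySem.List.pyRange 0 (m : Int) 1).foldl (stepB cs parts)
      ((List.replicate (cs.length + 1) 0).set 0 1) = pvC cs parts m := by
  intro m
  induction m with
  | zero =>
    intro _
    rw [show ((0 : Nat) : Int) = 0 by norm_num, PySem.List.pyRange_one_eq_nil (by omega), List.foldl_nil,
      pvC_zero]
  | succ m ih =>
    intro hm1
    rw [show ((m + 1 : Nat) : Int) = (m : Int) + 1 by push_cast; ring,
      PySem.List.pyRange_one_succ_right (by omega), List.foldl_append,
      ih (by omega), List.foldl_cons, List.foldl_nil]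
    exact pv_stepB cs parts m (by omega)

-- the final entry of B's array equals A's count
theorem pvC_final (cs : List Char) (parts : List String) :
    (pvC cs parts (cs.length + 1)).getD cs.length 0 = pvF cs parts cs.length := by
  set n := cs.length with hn
  rw [pvC_getD cs parts (n+1) n (by omega)]
  have hfil : parts.filter (fun p => PySem.Chars.endswith (cs.take n) p.toList &&
      decide (n < n + 1 + p.toList.length)) =
      parts.filter (fun p => PySem.Chars.endswith (cs.take n) p.toList) := by
    apply List.filter_congr
    intro p _
    rw [decide_eq_true (show n < n + 1 + p.toList.length by omega), Bool.and_true]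
  rw [hfil]
  rw [pv_sum_filter_split parts (fun p => PySem.Chars.endswith (cs.take n) p.toList)
    (fun p => p.toList.isEmpty), pv_filter_empty_eq]
  have hemp : ∀ p ∈ parts.filter (fun p => p.toList.isEmpty),
      pvArr cs parts (n - p.toList.length) = pvArr cs parts n := by
    intro p hp
    rw [List.mem_filter] at hp
    have hnil : p.toList = [] := by simpa [List.isEmpty_iff] using hp.2
    simp [hnil]
  rw [List.map_congr_left hemp, List.map_const', List.sum_replicate]
  have hne : ((parts.filter (fun p => PySem.Chars.endswith (cs.take n) p.toList &&
      !p.toList.isEmpty)).map (fun p => pvArr cs parts (n - p.toList.length))).sum =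
      pvArr cs parts n - (if n = 0 then (1:Int) else 0) := by
    have := pvArr_eq cs parts n
    omega
  rw [hne, pv_pvF_factor cs parts n (by omega), nsmul_eq_mul]
  unfold pvME
  rcases Nat.eq_zero_or_pos n with h0 | hp
  · simp only [h0]
    ring
  · have h0 : ¬ (n = 0) := by omega
    simp only [h0, if_false]
    ring

theorem pv_B_result (s : String) (parts : List String) :
    check_str_both_alt s parts =
      (pvF s.toList parts s.toList.length,
       decide (0 < pvF s.toList parts s.toList.length)) := by
  unfold check_str_both_alt
  show (PySem.List.pyGetD ((PySem.List.pyRange 0 ((s.toList.length : Int) + 1) 1).foldl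
        (stepB s.toList parts) ((List.replicate (s.toList.length + 1) 0).set 0 1))
        (s.toList.length : Int) 0,
      decide (0 < PySem.List.pyGetD ((PySem.List.pyRange 0 ((s.toList.length : Int) + 1) 1).foldl
        (stepB s.toList parts) ((List.replicate (s.toList.length + 1) 0).set 0 1))
        (s.toList.length : Int) 0)) = _
  have hc : ((s.toList.length : Int) + 1) = ((s.toList.length + 1 : Nat) : Int) := by
    push_cast; ring
  rw [hc, pvC_loop s.toList parts (s.toList.length + 1) (by omega),
    PySem.List.pyGetD_natCast, pvC_final s.toList parts]

-- ===== VERDICT (by name: the statement is the Claim_ definition above) =====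
theorem check_str_both_spec : Claim_equal_check_str_both := by
  intro s parts _
  unfold Spec_check_str_both
  rw [pv_A_result s parts, pv_B_result s parts, pvG_eq s.toList parts (le_refl _)]
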